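-- pv_equiv track=rewrite | github.com/pypi-data/pypi-mirror-273 | packages/python-iterutils/python_iterutils-0.0.1-py3-none-any.whl/iterutils/__init__.py | cut_iter
-- ===== SOURCE A (Python) =====
-- from collections.abc import AsyncGenerator, AsyncIterable, Generator, Iterable, Iterator
-- from typing import overload, Any, Optional, TypeVar
--
-- def cut_iter(
--     start: int,
--     stop: Optional[int] = None,
--     step: int = 1,
-- ) -> Iterator[tuple[int, int]]:
--     if stop is None:
--         start, stop = 0, start
--     for start in range(start + step, stop, step):
--         yield start, step
--     if start != stop:
--         yield stop, stop - start
-- ===== SOURCE B (Python) =====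
-- from typing import Optional, Iterator
--
--
-- def cut_iter(
--     start: int,
--     stop: Optional[int] = None,
--     step: int = 1,
-- ) -> Iterator[tuple[int, int]]:
--     if stop is None:
--         start, stop = 0, start
--     full = [start] + list(range(start + step, stop, step))
--     if full[-1] != stop:
--         full.append(stop)
--     for prev, cur in zip(full, full[1:]):
--         yield cur, cur - prev
-- ===== Notes on version B (the rewrite author's own statement) =====
-- stated objective: alternative
-- what changed: B materialises the interval boundaries as an explicit list ([start] + range points, plus stop if missing) and emits the output in one pairwise pass over consecutive boundaries (point, delta), instead of A's inline (point, step) yields followed by a special-cased tail yield.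
import Mathlib
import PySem

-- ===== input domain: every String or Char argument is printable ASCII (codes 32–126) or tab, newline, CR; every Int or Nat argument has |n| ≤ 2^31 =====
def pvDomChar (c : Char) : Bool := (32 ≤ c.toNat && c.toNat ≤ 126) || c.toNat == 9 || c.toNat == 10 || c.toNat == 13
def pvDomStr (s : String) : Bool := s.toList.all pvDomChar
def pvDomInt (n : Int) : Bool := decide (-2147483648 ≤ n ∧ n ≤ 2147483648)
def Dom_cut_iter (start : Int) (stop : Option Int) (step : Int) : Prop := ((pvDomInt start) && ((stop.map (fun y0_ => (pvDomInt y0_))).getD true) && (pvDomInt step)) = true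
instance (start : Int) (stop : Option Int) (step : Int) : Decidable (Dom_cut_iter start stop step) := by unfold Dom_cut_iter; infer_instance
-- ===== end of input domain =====

-- ===== PORT A =====
-- B rebuilds the same output from an explicit boundary list with one pairwise-difference pass
-- (objective: alternative decomposition of the same O(n) generator; return value compared as the list of yields).
def cut_iter (start : Int) (stop : Option Int) (step : Int) : List (Int × Int) :=
  -- if stop is None: start, stop = 0, start
  let p : Int × Int := match stop with | none => (0, start) | some s => (start, s)
  let start := p.1
  let stop := p.2
  -- for start in range(start + step, stop, step): yield start, step
  let r := PySem.List.pyRange (start + step) stop step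
  let out := r.map (fun x => (x, step))
  -- the loop variable 'start' after the loop (unchanged when the range is empty)
  let last := r.foldl (fun _ x => x) start
  -- if start != stop: yield stop, stop - start
  if last ≠ stop then out ++ [(stop, stop - last)] else out

-- ===== PORT B =====
-- helper for Source B's final loop: 'for prev, cur in zip(full, full[1:]): yield cur, cur - prev'
-- (full[1:] of a list is its tail)
def pvPairs (l : List Int) : List (Int × Int) :=
  (l.zip l.tail).map (fun q => (q.2, q.2 - q.1))

def cut_iter_alt (start : Int) (stop : Option Int) (step : Int) : List (Int × Int) :=
  let p : Int × Int := match stop with | none => (0, start) | some s => (start, s)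
  let start := p.1
  let stop := p.2
  -- full = [start] + list(range(start + step, stop, step))
  let full0 := start :: PySem.List.pyRange (start + step) stop step
  -- if full[-1] != stop: full.append(stop)   (full is nonempty, so full[-1] is its last element)
  let full := if full0.getLastD 0 ≠ stop then full0 ++ [stop] else full0
  pvPairs full

-- ===== PRECONDITION & SPEC =====
-- Pre_ excludes exactly step = 0, where Python's range raises ValueError (in both A and B).
def Pre_cut_iter (start : Int) (stop : Option Int) (step : Int) : Prop := step ≠ 0
instance (start : Int) (stop : Option Int) (step : Int) : Decidable (Pre_cut_iter start stop step) := by unfold Pre_cut_iter; infer_instance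
def pvWitness_cut_iter : Int × Option Int × Int := (1, some 10, 3)
def Spec_cut_iter (start : Int) (stop : Option Int) (step : Int) (out : List (Int × Int)) : Prop := out = cut_iter_alt start stop step
instance (start : Int) (stop : Option Int) (step : Int) (out : List (Int × Int)) : Decidable (Spec_cut_iter start stop step out) := by unfold Spec_cut_iter; infer_instance

-- ===== CLAIM (what is proved, stated in full; the proofs are below) =====
def Claim_equal_cut_iter : Prop := ∀ (start : Int) (stop : Option Int) (step : Int), Dom_cut_iter start stop step → Pre_cut_iter start stop step → Spec_cut_iter start stop step (cut_iter start stop step)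

-- ===== LEMMAS AND PROOFS =====

-- closed form of pyRange for a nonzero step (its count, made explicit)
def pvCount (a b s : Int) : Nat :=
  if 0 < s then (if a < b then ((b - a + s - 1) / s).toNat else 0)
  else (if b < a then ((a - b + -s - 1) / -s).toNat else 0)

theorem pyRange_eq (a b s : Int) (hs : s ≠ 0) :
    PySem.List.pyRange a b s
      = (List.range (pvCount a b s)).map (fun k : Nat => a + s * (k : Int)) := by
  unfold PySem.List.pyRange pvCount
  rw [if_neg hs]

theorem pvPairs_cons_cons (a b : Int) (l : List Int) :
    pvPairs (a :: b :: l) = (b, b - a) :: pvPairs (b :: l) := by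
  simp [pvPairs]

-- foldl that keeps only the last element is getLastD
theorem foldl_last (l : List Int) (d : Int) :
    l.foldl (fun _ x => x) d = l.getLastD d := by
  induction l generalizing d with
  | nil => rfl
  | cons a t ih => rw [List.foldl_cons, ih, List.getLastD_cons]

-- appending one boundary appends one pair
theorem pvPairs_append_last (a x : Int) (l : List Int) :
    pvPairs ((a :: l) ++ [x]) = pvPairs (a :: l) ++ [(x, x - (a :: l).getLastD 0)] := by
  induction l generalizing a with
  | nil => simp [pvPairs]
  | cons b t ih =>
    calc pvPairs ((a :: b :: t) ++ [x]) = pvPairs (a :: b :: (t ++ [x])) := by simp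
    _ = (b, b - a) :: pvPairs (b :: (t ++ [x])) := pvPairs_cons_cons ..
    _ = (b, b - a) :: (pvPairs (b :: t) ++ [(x, x - (b :: t).getLastD 0)]) := by
          rw [show b :: (t ++ [x]) = (b :: t) ++ [x] from rfl, ih b]
    _ = pvPairs (a :: b :: t) ++ [(x, x - (a :: b :: t).getLastD 0)] := by
          rw [pvPairs_cons_cons]; simp only [List.getLastD_cons, List.cons_append]

-- last boundary of start :: arithmetic list
theorem lastD_boundary (s b : Int) (c : Nat) :
    (b :: (List.range c).map (fun k : Nat => (b + s) + s * (k : Int))).getLastD 0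
      = b + s * c := by
  cases c with
  | zero => simp
  | succ n =>
    rw [List.range_succ, List.map_append]
    simp only [List.map_cons, List.map_nil]
    rw [show b :: ((List.range n).map (fun k : Nat => (b + s) + s * (k : Int))
            ++ [(b + s) + s * (n : Int)])
          = (b :: (List.range n).map (fun k : Nat => (b + s) + s * (k : Int)))
            ++ [(b + s) + s * (n : Int)] from rfl]
    simp [List.getLastD]
    ring

-- same value as A's post-loop 'start' variable: default start, not 0
theorem getLastD_range_map (s b : Int) (c : Nat) :
    ((List.range c).map (fun k : Nat => (b + s) + s * (k : Int))).getLastD b = b + s * c := by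
  have h := lastD_boundary s b c
  cases hc : (List.range c).map (fun k : Nat => (b + s) + s * (k : Int)) with
  | nil =>
    have hlen := congrArg List.length hc
    simp at hlen
    subst hlen; simp
  | cons y ys =>
    rw [hc, List.getLastD_cons] at h
    exact h

-- pairwise differences across an arithmetic boundary list are all 'step'
theorem pvPairs_arith (s b : Int) (c : Nat) :
    pvPairs (b :: (List.range c).map (fun k : Nat => (b + s) + s * (k : Int)))
      = ((List.range c).map (fun k : Nat => (b + s) + s * (k : Int))).map (fun x => (x, s)) := by
  induction c with
  | zero => rfl
  | succ n ih =>
    rw [List.range_succ, List.map_append]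
    simp only [List.map_cons, List.map_nil]
    rw [show b :: ((List.range n).map (fun k : Nat => (b + s) + s * (k : Int))
            ++ [(b + s) + s * (n : Int)])
          = (b :: (List.range n).map (fun k : Nat => (b + s) + s * (k : Int)))
            ++ [(b + s) + s * (n : Int)] from rfl,
        pvPairs_append_last, ih, lastD_boundary, List.map_append]
    simp

-- core equivalence, stop already a plain integer
theorem pv_core (start stop step : Int) (hs : step ≠ 0) :
    cut_iter start (some stop) step = cut_iter_alt start (some stop) step := by
  have hr := pyRange_eq (start + step) stop step hs
  simp only [cut_iter, cut_iter_alt, hr, foldl_last]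
  rw [getLastD_range_map step start (pvCount (start + step) stop step),
      lastD_boundary step start (pvCount (start + step) stop step)]
  by_cases h : start + step * (pvCount (start + step) stop step : Int) = stop
  · rw [if_neg (by simpa using h), if_neg (by simpa using h)]
    exact (pvPairs_arith step start (pvCount (start + step) stop step)).symm
  · rw [if_pos h, if_pos h, pvPairs_append_last, pvPairs_arith, lastD_boundary]

-- ===== VERDICT (by name: the statement is the Claim_ definition above) =====
theorem cut_iter_spec : Claim_equal_cut_iter := by
  intro start stop step _ hp
  unfold Spec_cut_iter
  cases stop with
  | none =>
    have h1 : cut_iter start none step = cut_iter 0 (some start) step := rfl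
    have h2 : cut_iter_alt start none step = cut_iter_alt 0 (some start) step := rfl
    rw [h1, h2]; exact pv_core 0 start step hp
  | some s => exact pv_core start s step hp
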